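-- pv_equiv track=rewrite | github.com/20130353/Leetcode | target_offer/二分+双指针+滑动窗口/滑动窗口-满足最大-最小小于某个数的窗口个数问题.py | max_min_subarr
-- ===== SOURCE A (Python) =====
-- from collections import deque
--
-- def max_min_subarr(arr, num):
--     max_deq = deque()
--     min_deq = deque()
--     ans = 0
--     j = 0
--     for i in range(len(arr)):
--         flag = 0
--         while j < len(arr):
--             while len(max_deq) >= 1 and max_deq[0][1] < i:
--                 max_deq.popleft()
--             while len(max_deq) >= 1 and max_deq[-1][0] <= arr[j]:
--                 max_deq.pop()
--             max_deq.append((arr[j], j))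
--
--             while len(min_deq) >= 1 and min_deq[0][1] < i:
--                 min_deq.popleft()
--             while len(min_deq) >= 1 and min_deq[-1][0] >= arr[j]:
--                 min_deq.pop()
--             min_deq.append((arr[j], j))
--
--             if max_deq[0][0] - min_deq[0][0] > num:
--                 flag = 1
--                 ans += j - i
--                 break
--             else:
--                 j += 1
--         if flag == 0:
--             ans += j - i
--     return ans
-- ===== SOURCE B (Python) =====
-- def max_min_subarr(arr, num):
--     if num < 0:
--         return 0
--     n = len(arr)
--     mx = [arr[:]]
--     mn = [arr[:]]
--     k = 1
--     while (1 << k) <= n: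
--         half = 1 << (k - 1)
--         pm = mx[-1]
--         pn = mn[-1]
--         m = n - (1 << k) + 1
--         mx.append([pm[i] if pm[i] >= pm[i + half] else pm[i + half] for i in range(m)])
--         mn.append([pn[i] if pn[i] <= pn[i + half] else pn[i + half] for i in range(m)])
--         k += 1
--     ans = 0
--     for i in range(n):
--         lo, hi = i, n
--         while lo < hi:
--             mid = (lo + hi) // 2
--             k = (mid - i + 1).bit_length() - 1
--             p = 1 << k
--             mxk = mx[k]; mnk = mn[k]
--             a = mxk[i]; b2 = mxk[mid - p + 1]
--             c = mnk[i]; d = mnk[mid - p + 1]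
--             if (a if a >= b2 else b2) - (c if c <= d else d) > num:
--                 hi = mid
--             else:
--                 lo = mid + 1
--         ans += lo - i
--     return ans
-- ===== Notes on version B (the rewrite author's own statement) =====
-- stated objective: alternative
-- what changed: A counts the subarrays with an amortized two-pointer scan over two monotonic deques of (value,index) pairs; B instead precomputes doubling sparse tables for range max and range min and, for each left endpoint, binary-searches the first right endpoint whose window spread exceeds num, adding that distance (O(n log n) vs A's O(n); B also returns 0 outright for negative num instead of A's negative miscount).
-- intended difference: For num < 0 and len(arr) >= 2, A returns the negative garbage value -n(n-1)/2 (its shared pointer j is stranded at 0 and it keeps adding j-i), while B returns 0, the correct count of subarrays whose max-min spread is <= a negative num. — e.g. on max_min_subarr([0, 0], -1): A returns -1, B returns 0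
import Mathlib
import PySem

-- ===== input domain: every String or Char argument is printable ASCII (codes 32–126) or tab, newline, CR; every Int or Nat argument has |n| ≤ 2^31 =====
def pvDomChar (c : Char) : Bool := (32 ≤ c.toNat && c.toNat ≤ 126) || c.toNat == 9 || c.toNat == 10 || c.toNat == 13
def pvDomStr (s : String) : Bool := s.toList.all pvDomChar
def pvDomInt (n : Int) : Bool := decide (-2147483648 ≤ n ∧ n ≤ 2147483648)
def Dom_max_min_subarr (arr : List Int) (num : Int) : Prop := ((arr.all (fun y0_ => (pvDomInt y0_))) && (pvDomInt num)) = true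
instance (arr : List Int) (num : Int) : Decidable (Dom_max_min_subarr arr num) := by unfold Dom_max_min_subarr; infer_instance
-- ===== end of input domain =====

-- B replaces A's amortized two-pointer scan over two monotonic deques by a different
-- algorithm: doubling sparse tables for range max / range min plus, per left endpoint,
-- a binary search for the first right endpoint whose window spread exceeds num
-- (O(n log n), not faster than A); for num < 0 B returns 0 (the true count) where A
-- returns a negative miscount (see D_max_min_subarr below).

-- ===== PORT A =====
-- popleft/pop while-loops on a deque are dropWhile from the front / from the back
def pvRevDrop (p : Int × Nat → Bool) (d : List (Int × Nat)) : List (Int × Nat) :=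
  (d.reverse.dropWhile p).reverse

-- the inner `while j < len(arr)` loop of A; returns (j, max_deq, min_deq, flag, ans increment
-- made inside the loop); the structural fuel argument (passed as n - j) only makes the recursion
-- total, the loop itself is still guarded by `j < n`
def pvInnerA (arr : List Int) (num : Int) (n i : Nat) :
    Nat → Nat → List (Int × Nat) → List (Int × Nat) →
    Nat × List (Int × Nat) × List (Int × Nat) × Bool × Int
  | 0, j, maxd, mind => (j, maxd, mind, false, 0)
  | fuel + 1, j, maxd, mind =>
    if j < n then
      let aj := arr.getD j 0
      let maxd1 := maxd.dropWhile (fun p => p.2 < i)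
      let maxd2 := pvRevDrop (fun p => p.1 ≤ aj) maxd1 ++ [(aj, j)]
      let mind1 := mind.dropWhile (fun p => p.2 < i)
      let mind2 := pvRevDrop (fun p => aj ≤ p.1) mind1 ++ [(aj, j)]
      if (maxd2.headD (0, 0)).1 - (mind2.headD (0, 0)).1 > num then
        (j, maxd2, mind2, true, (j : Int) - (i : Int))
      else
        pvInnerA arr num n i fuel (j + 1) maxd2 mind2
    else (j, maxd, mind, false, 0)

def max_min_subarr (arr : List Int) (num : Int) : Int :=
  let n := arr.length
  ((List.range n).foldl
    (fun (st : Int × Nat × List (Int × Nat) × List (Int × Nat)) i =>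
      match st with
      | (ans, j, maxd, mind) =>
        match pvInnerA arr num n i (n - j) j maxd mind with
        | (j', maxd', mind', flag, d) =>
          let ans1 := ans + d
          let ans2 := if flag then ans1 else ans1 + ((j' : Int) - (i : Int))
          (ans2, j', maxd', mind'))
    (0, 0, [], [])).1

-- ===== PORT B =====
-- `pm[i] if pm[i] >= pm[i+half] else pm[i+half]` and its min counterpart
def combMax : Int → Int → Int := fun a b => if b ≤ a then a else b
def combMin : Int → Int → Int := fun a b => if a ≤ b then a else b

-- B's `while (1 << k) <= n` table-building loop; the recursion carries the last level
-- (Python reads `mx[-1]`); fuel (passed as n) only makes the recursion total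
def pvBuildLvls (n : Nat) (comb : Int → Int → Int) : Nat → Nat → List Int → List (List Int)
  | 0, _, _ => []
  | fuel + 1, k, prev =>
    if 2 ^ k ≤ n then
      let cur := (List.range (n - 2 ^ k + 1)).map
        (fun i => comb (prev.getD i 0) (prev.getD (i + 2 ^ (k - 1)) 0))
      cur :: pvBuildLvls n comb fuel (k + 1) cur
    else []

-- one sparse-table query; `(r - l + 1).bit_length() - 1` is exactly Nat.log2 (r - l + 1)
-- for the nonempty windows (r ≥ l) on which B evaluates it
def pvQ (tbl : List (List Int)) (comb : Int → Int → Int) (l r : Nat) : Int :=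
  let k := Nat.log2 (r - l + 1)
  comb ((tbl.getD k []).getD l 0) ((tbl.getD k []).getD (r + 1 - 2 ^ k) 0)

-- B's `while lo < hi` binary search; fuel (passed as n + 1 - i ≥ hi - lo + 1) only
-- makes the recursion total
def pvBSearch (num : Int) (mx mn : List (List Int)) (i : Nat) : Nat → Nat → Nat → Nat
  | 0, lo, _ => lo
  | fuel + 1, lo, hi =>
    if lo < hi then
      let mid := (lo + hi) / 2
      if pvQ mx combMax i mid - pvQ mn combMin i mid > num then
        pvBSearch num mx mn i fuel lo mid
      else
        pvBSearch num mx mn i fuel (mid + 1) hi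
    else lo

def max_min_subarr_alt (arr : List Int) (num : Int) : Int :=
  if num < 0 then 0
  else
    let n := arr.length
    let mx := arr :: pvBuildLvls n combMax n 1 arr
    let mn := arr :: pvBuildLvls n combMin n 1 arr
    (List.range n).foldl
      (fun ans i => ans + ((pvBSearch num mx mn i (n + 1 - i) i n : Int) - (i : Int))) 0

-- ===== PRECONDITION & SPEC =====
-- For num < 0 and len(arr) ≥ 2, A returns the negative value -n(n-1)/2 (its shared pointer j is
-- stranded at 0 and it keeps adding j - i), while B returns 0, the correct count of subarrays
-- whose max-min spread is ≤ a negative num.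
def D_max_min_subarr (arr : List Int) (num : Int) : Prop := num < 0 ∧ 2 ≤ arr.length
instance (arr : List Int) (num : Int) : Decidable (D_max_min_subarr arr num) := by
  unfold D_max_min_subarr; infer_instance

def Spec_max_min_subarr (arr : List Int) (num : Int) (out : Int) : Prop :=
  ¬ D_max_min_subarr arr num → out = max_min_subarr_alt arr num
instance (arr : List Int) (num : Int) (out : Int) : Decidable (Spec_max_min_subarr arr num out) := by
  unfold Spec_max_min_subarr; infer_instance

def pvDiffWitness_max_min_subarr : List Int × Int := ([0, 0], -1)
def pvDiffWitnessOut_max_min_subarr : Int × Int := (-1, 0)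

-- ===== CLAIM (what is proved, stated in full; the proofs are below) =====
def Claim_unchanged_max_min_subarr : Prop := ∀ (arr : List Int) (num : Int), Dom_max_min_subarr arr num → Spec_max_min_subarr arr num (max_min_subarr arr num)
def Claim_changed_max_min_subarr : Prop := Dom_max_min_subarr (pvDiffWitness_max_min_subarr.1) (pvDiffWitness_max_min_subarr.2) ∧ D_max_min_subarr (pvDiffWitness_max_min_subarr.1) (pvDiffWitness_max_min_subarr.2) ∧ max_min_subarr (pvDiffWitness_max_min_subarr.1) (pvDiffWitness_max_min_subarr.2) = pvDiffWitnessOut_max_min_subarr.1 ∧ max_min_subarr_alt (pvDiffWitness_max_min_subarr.1) (pvDiffWitness_max_min_subarr.2) = pvDiffWitnessOut_max_min_subarr.2 ∧ pvDiffWitnessOut_max_min_subarr.1 ≠ pvDiffWitnessOut_max_min_subarr.2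
def Claim_exact_max_min_subarr : Prop := ∀ (arr : List Int) (num : Int), Dom_max_min_subarr arr num → D_max_min_subarr arr num → max_min_subarr arr num ≠ max_min_subarr_alt arr num


-- ===== LEMMAS AND PROOFS =====

-- ---- basic abbreviations (proof-side only) ----
def vA (arr : List Int) (k : Nat) : Int := arr.getD k 0
def pairize (arr : List Int) (l : List Nat) : List (Int × Nat) := l.map (fun k => (vA arr k, k))
def pvRevDropN (p : Nat → Bool) (d : List Nat) : List Nat :=
  (d.reverse.dropWhile p).reverse

-- generic monotone-deque theory, parametrised by the pop comparison `cmp`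
def keepG (v : Nat → Int) (cmp : Int → Int → Bool) (hi k : Nat) : Bool :=
  (List.range' (k + 1) (hi - (k + 1))).all (fun m => !cmp (v k) (v m))
def SMG (v : Nat → Int) (cmp : Int → Int → Bool) (lo hi : Nat) : List Nat :=
  (List.range' lo (hi - lo)).filter (keepG v cmp hi)

lemma pv_dropWhile_dropWhile {A : Type} (p q : A → Bool) (l : List A)
    (h : ∀ x, q x = true → p x = true) : (l.dropWhile q).dropWhile p = l.dropWhile p := by
  induction l with
  | nil => rfl
  | cons a t ih =>
    by_cases hq : q a = true
    · rw [List.dropWhile_cons_of_pos hq, List.dropWhile_cons_of_pos (h a hq)]; exact ih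
    · rw [List.dropWhile_cons_of_neg (by simpa using hq)]

lemma pv_dropWhile_ne_nil_exists {A : Type} {p : A → Bool} {l : List A}
    (h : ¬ (l.dropWhile p = [])) : ∃ x ∈ l, p x = false := by
  by_contra hc
  apply h
  apply List.dropWhile_eq_nil_iff.mpr
  intro x hx
  by_contra hpx
  exact hc ⟨x, hx, by simpa using hpx⟩

lemma pv_revDropN_eq_filter (v : Nat → Int) (cmp : Int → Int → Bool) (w : Int)
    (htot : ∀ x y, cmp x y = false → cmp y x = true)
    (htrans : ∀ x y z, cmp x y = true → cmp y z = true → cmp x z = true)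
    (l : List Nat) (hp : l.Pairwise (fun k k' => cmp (v k) (v k') = false)) :
    pvRevDropN (fun k => cmp (v k) w) l = l.filter (fun k => !cmp (v k) w) := by
  induction l with
  | nil => rfl
  | cons a t ih =>
    have hpt := hp.of_cons
    have hrel : ∀ k' ∈ t, cmp (v a) (v k') = false := (List.pairwise_cons.mp hp).1
    unfold pvRevDropN at *
    rw [List.reverse_cons, List.dropWhile_append]
    by_cases he : (t.reverse.dropWhile (fun k => cmp (v k) w)).isEmpty = true
    · have hall : ∀ k' ∈ t, cmp (v k') w = true := by
        intro k' hk'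
        have := List.dropWhile_eq_nil_iff.mp (List.isEmpty_iff.mp he) k' (by simpa using hk')
        simpa using this
      have hft : t.filter (fun k => !cmp (v k) w) = [] := by
        apply List.filter_eq_nil_iff.mpr; intro k hk; simp [hall k hk]
      by_cases ha : cmp (v a) w = true
      · simp [he, List.dropWhile, ha, hft]
      · simp only [Bool.not_eq_true] at ha
        simp [he, List.dropWhile, ha, hft]
    · have hne : ¬ (t.reverse.dropWhile (fun k => cmp (v k) w) = []) := by
        simpa [List.isEmpty_iff] using he
      obtain ⟨k', hk', hk'f⟩ := pv_dropWhile_ne_nil_exists hne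
      have hk't : k' ∈ t := by simpa using hk'
      have ha : cmp (v a) w = false := by
        by_contra hc
        simp only [Bool.not_eq_false] at hc
        have h1 := htot _ _ (hrel k' hk't)
        have := htrans _ _ _ h1 hc
        simp [this] at hk'f
      rw [if_neg he]
      rw [List.reverse_append, List.reverse_cons]
      simp only [List.reverse_nil, List.nil_append, List.cons_append, List.nil_append]
      rw [ih hpt]
      simp [ha]

lemma pv_mem_SMG {v : Nat → Int} {cmp : Int → Int → Bool} {lo hi k : Nat}
    (h : k ∈ SMG v cmp lo hi) : lo ≤ k ∧ k < hi ∧ keepG v cmp hi k = true := by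
  unfold SMG at h
  have h1 := List.mem_filter.mp h
  have h2 := List.mem_range'_1.mp h1.1
  refine ⟨h2.1, ?_, h1.2⟩
  omega

lemma pv_keepG_beats {v : Nat → Int} {cmp : Int → Int → Bool} {hi k m : Nat}
    (h : keepG v cmp hi k = true) (h1 : k < m) (h2 : m < hi) : cmp (v k) (v m) = false := by
  unfold keepG at h
  have := List.all_eq_true.mp h m (List.mem_range'_1.mpr (by omega))
  simpa using this

lemma pv_SMG_sorted (v : Nat → Int) (cmp : Int → Int → Bool) (lo hi : Nat) :
    (SMG v cmp lo hi).Pairwise (· < ·) :=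
  (List.pairwise_lt_range' 1).filter _

lemma pv_SMG_pairS (v : Nat → Int) (cmp : Int → Int → Bool) (lo hi : Nat) :
    (SMG v cmp lo hi).Pairwise (fun k k' => cmp (v k) (v k') = false) := by
  refine (pv_SMG_sorted v cmp lo hi).imp_of_mem ?_
  intro k k' hk hk' hlt
  exact pv_keepG_beats (pv_mem_SMG hk).2.2 hlt (pv_mem_SMG hk').2.1

lemma pv_keepG_last (v : Nat → Int) (cmp : Int → Int → Bool) (hi : Nat) :
    keepG v cmp (hi + 1) hi = true := by
  unfold keepG
  simp

lemma pv_G1 (v : Nat → Int) (cmp : Int → Int → Bool)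
    (htot : ∀ x y, cmp x y = false → cmp y x = true)
    (htrans : ∀ x y z, cmp x y = true → cmp y z = true → cmp x z = true)
    {lo hi : Nat} (hlh : lo ≤ hi) :
    pvRevDropN (fun k => cmp (v k) (v hi)) (SMG v cmp lo hi) ++ [hi] = SMG v cmp lo (hi + 1) := by
  rw [pv_revDropN_eq_filter v cmp (v hi) htot htrans _ (pv_SMG_pairS v cmp lo hi)]
  unfold SMG
  have hcnt : hi + 1 - lo = (hi - lo) + 1 := by omega
  rw [hcnt, List.range'_concat]
  have hhi : lo + 1 * (hi - lo) = hi := by omega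
  rw [hhi, List.filter_append]
  have hlast : List.filter (keepG v cmp (hi + 1)) [hi] = [hi] := by
    simp [pv_keepG_last v cmp hi]
  rw [hlast, List.filter_filter]
  congr 1
  apply List.filter_congr
  intro k hk
  have hk2 := List.mem_range'_1.mp hk
  have hkhi : k < hi := by omega
  unfold keepG
  have hsplit : hi + 1 - (k + 1) = (hi - (k + 1)) + 1 := by omega
  rw [hsplit, List.range'_concat]
  have : k + 1 + 1 * (hi - (k + 1)) = hi := by omega
  rw [this, List.all_append]
  simp [Bool.and_comm]

lemma pv_G3 (v : Nat → Int) (cmp : Int → Int → Bool)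
    (hrefl : ∀ x, cmp x x = true)
    (htot : ∀ x y, cmp x y = false → cmp y x = true)
    (htrans : ∀ x y z, cmp x y = true → cmp y z = true → cmp x z = true)
    {lo hi : Nat} (hlh : lo ≤ hi) :
    pvRevDropN (fun k => cmp (v k) (v hi)) (SMG v cmp lo (hi + 1)) ++ [hi] = SMG v cmp lo (hi + 1) := by
  have hG1 := pv_G1 v cmp htot htrans hlh
  have hfe := pv_revDropN_eq_filter v cmp (v hi) htot htrans _ (pv_SMG_pairS v cmp lo hi)
  set X := (SMG v cmp lo hi).filter (fun k => !cmp (v k) (v hi)) with hX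
  have hrep : SMG v cmp lo (hi + 1) = X ++ [hi] := by rw [← hG1, hfe]
  rw [pv_revDropN_eq_filter v cmp (v hi) htot htrans _ (pv_SMG_pairS v cmp lo (hi + 1)), hrep,
    List.filter_append]
  have h1 : X.filter (fun k => !cmp (v k) (v hi)) = X := by
    rw [hX, List.filter_filter]
    apply List.filter_congr
    intro k _
    simp [Bool.and_self]
  have h2 : List.filter (fun k => !cmp (v k) (v hi)) [hi] = [] := by
    simp [hrefl (v hi)]
  rw [h1, h2, List.append_nil]

lemma pv_dropWhile_lt_filter {i' : Nat} (l : List Nat) (hp : l.Pairwise (· < ·)) :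
    l.dropWhile (fun k => decide (k < i')) = l.filter (fun k => !decide (k < i')) := by
  induction l with
  | nil => rfl
  | cons a t ih =>
    have hrel := (List.pairwise_cons.mp hp).1
    by_cases ha : a < i'
    · rw [List.dropWhile_cons_of_pos (by simpa using ha)]
      rw [ih hp.of_cons]
      simp [ha]
    · rw [List.dropWhile_cons_of_neg (by simpa using ha)]
      have : t.filter (fun k => !decide (k < i')) = t := by
        apply List.filter_eq_self.mpr
        intro k hk
        have := hrel k hk
        simp; omega
      simp [ha, this]

lemma pv_filter_ge_range' {lo i' n : Nat} (h : lo ≤ i') :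
    (List.range' lo n).filter (fun k => !decide (k < i')) = List.range' i' (lo + n - i') := by
  by_cases hc : i' ≤ lo + n
  · have hsplit : n = (i' - lo) + (lo + n - i') := by omega
    rw [hsplit]
    rw [← List.range'_append]
    have : lo + 1 * (i' - lo) = i' := by omega
    rw [this, List.filter_append]
    have h1 : (List.range' lo (i' - lo)).filter (fun k => !decide (k < i')) = [] := by
      apply List.filter_eq_nil_iff.mpr
      intro k hk
      have := List.mem_range'_1.mp hk
      simp; omega
    have h2 : (List.range' i' (lo + n - i')).filter (fun k => !decide (k < i')) =
        List.range' i' (lo + n - i') := by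
      apply List.filter_eq_self.mpr
      intro k hk
      have := List.mem_range'_1.mp hk
      simp; omega
    rw [h1, h2, List.nil_append]
    congr 1
    omega
  · have h1 : (List.range' lo n).filter (fun k => !decide (k < i')) = [] := by
      apply List.filter_eq_nil_iff.mpr
      intro k hk
      have := List.mem_range'_1.mp hk
      simp; omega
    have h2 : lo + n - i' = 0 := by omega
    rw [h1, h2]
    rfl

lemma pv_G2 (v : Nat → Int) (cmp : Int → Int → Bool) {lo i' hi : Nat} (h : lo ≤ i') :
    (SMG v cmp lo hi).dropWhile (fun k => decide (k < i')) = SMG v cmp i' hi := by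
  rw [pv_dropWhile_lt_filter _ (pv_SMG_sorted v cmp lo hi)]
  unfold SMG
  rw [List.filter_filter]
  have : ∀ (l : List Nat), l.filter (fun a => !decide (a < i') && keepG v cmp hi a) =
      (l.filter (fun k => !decide (k < i'))).filter (keepG v cmp hi) := by
    intro l
    rw [List.filter_filter]
    apply List.filter_congr
    intro k _
    rw [Bool.and_comm]
  rw [this, pv_filter_ge_range' h]
  have he : lo + (hi - lo) - i' = hi - i' := by omega
  rw [he]

lemma pv_SMG_ne_nil (v : Nat → Int) (cmp : Int → Int → Bool) {lo hi : Nat} (h : lo ≤ hi) :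
    SMG v cmp lo (hi + 1) ≠ [] := by
  have : hi ∈ SMG v cmp lo (hi + 1) := by
    unfold SMG
    apply List.mem_filter.mpr
    exact ⟨List.mem_range'_1.mpr (by omega), pv_keepG_last v cmp hi⟩
  exact List.ne_nil_of_mem this

lemma pv_G4 (v : Nat → Int) (cmp : Int → Int → Bool)
    (htot : ∀ x y, cmp x y = false → cmp y x = true)
    (htrans : ∀ x y z, cmp x y = true → cmp y z = true → cmp x z = true)
    (lo : Nat) : ∀ (d : Nat),
    v ((SMG v cmp lo (lo + d + 1)).headD 0) =
      (List.range' (lo + 1) d).foldl (fun x m => if cmp x (v m) then v m else x) (v lo) := by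
  intro d
  induction d with
  | zero =>
    have : SMG v cmp lo (lo + 0 + 1) = [lo] := by
      unfold SMG
      have : lo + 0 + 1 - lo = 1 := by omega
      rw [this]
      show List.filter _ [lo] = [lo]
      simp [pv_keepG_last v cmp lo]
    rw [this]
    rfl
  | succ d ih =>
    have hlh : lo ≤ lo + d := by omega
    have hG1 := pv_G1 v cmp htot htrans (hi := lo + d) (lo := lo) hlh
    have hfe := pv_revDropN_eq_filter v cmp (v (lo + d)) htot htrans _ (pv_SMG_pairS v cmp lo (lo + d))
    have hrep : SMG v cmp lo (lo + d + 1 + 1) =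
        (SMG v cmp lo (lo + d + 1)).filter (fun k => !cmp (v k) (v (lo + d + 1))) ++ [lo + d + 1] := by
      rw [← pv_G1 v cmp htot htrans (lo := lo) (hi := lo + d + 1) (by omega),
        pv_revDropN_eq_filter v cmp _ htot htrans _ (pv_SMG_pairS v cmp lo (lo + d + 1))]
    have hrhs : List.range' (lo + 1) (d + 1) = List.range' (lo + 1) d ++ [lo + 1 + d] := by
      rw [List.range'_concat]
      simp
    obtain ⟨h, t, hht⟩ := List.exists_cons_of_ne_nil (pv_SMG_ne_nil v cmp (lo := lo) (hi := lo + d) (by omega))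
    have hpairs := pv_SMG_pairS v cmp lo (lo + d + 1)
    rw [hht] at hpairs
    have hrel := (List.pairwise_cons.mp hpairs).1
    have hhead : v h = (List.range' (lo + 1) d).foldl (fun x m => if cmp x (v m) then v m else x) (v lo) := by
      rw [← ih, hht]
      rfl
    have hgoal_eq : lo + (d + 1) + 1 = lo + d + 1 + 1 := by omega
    rw [hgoal_eq, hrep, hrhs, List.foldl_append]
    simp only [List.foldl_cons, List.foldl_nil]
    have hlo1d : lo + 1 + d = lo + d + 1 := by omega
    rw [hlo1d, ← hhead]
    by_cases hc : cmp (v h) (v (lo + d + 1)) = true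
    · have hX : (SMG v cmp lo (lo + d + 1)).filter (fun k => !cmp (v k) (v (lo + d + 1))) = [] := by
        apply List.filter_eq_nil_iff.mpr
        intro k hk
        rw [hht] at hk
        rcases List.mem_cons.mp hk with hk | hk
        · subst hk; simp [hc]
        · have h1 := htot _ _ (hrel k hk)
          have h2 := htrans _ _ _ h1 hc
          simp [h2]
      rw [hX, if_pos hc]
      rfl
    · have hcf : cmp (v h) (v (lo + d + 1)) = false := by simpa using hc
      have hX : (SMG v cmp lo (lo + d + 1)).filter (fun k => !cmp (v k) (v (lo + d + 1))) =
          h :: t.filter (fun k => !cmp (v k) (v (lo + d + 1))) := by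
        rw [hht]
        simp [hcf]
      rw [hX, if_neg hc]
      rfl

-- ---- instantiations: max / min ----
def cmpMax : Int → Int → Bool := fun x y => decide (x ≤ y)
def cmpMin : Int → Int → Bool := fun x y => decide (y ≤ x)

lemma cmpMax_refl : ∀ x : Int, cmpMax x x = true := by intro x; simp [cmpMax]
lemma cmpMax_tot : ∀ x y : Int, cmpMax x y = false → cmpMax y x = true := by
  intro x y h; simp [cmpMax] at *; omega
lemma cmpMax_trans : ∀ x y z : Int, cmpMax x y = true → cmpMax y z = true → cmpMax x z = true := by
  intro x y z h1 h2; simp [cmpMax] at *; omega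
lemma cmpMin_refl : ∀ x : Int, cmpMin x x = true := by intro x; simp [cmpMin]
lemma cmpMin_tot : ∀ x y : Int, cmpMin x y = false → cmpMin y x = true := by
  intro x y h; simp [cmpMin] at *; omega
lemma cmpMin_trans : ∀ x y z : Int, cmpMin x y = true → cmpMin y z = true → cmpMin x z = true := by
  intro x y z h1 h2; simp [cmpMin] at *; omega

def fmax (arr : List Int) (lo hi : Nat) : Int :=
  (List.range' (lo + 1) (hi - lo)).foldl (fun x m => max x (vA arr m)) (vA arr lo)
def fmin (arr : List Int) (lo hi : Nat) : Int :=
  (List.range' (lo + 1) (hi - lo)).foldl (fun x m => min x (vA arr m)) (vA arr lo)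

lemma pv_headD_SMmax (arr : List Int) {lo hi : Nat} (h : lo ≤ hi) :
    vA arr ((SMG (vA arr) cmpMax lo (hi + 1)).headD 0) = fmax arr lo hi := by
  have := pv_G4 (vA arr) cmpMax cmpMax_tot cmpMax_trans lo (hi - lo)
  have he : lo + (hi - lo) = hi := by omega
  rw [he] at this
  rw [this]
  unfold fmax
  congr 1
  funext x m
  rw [max_def]
  simp [cmpMax]

lemma pv_headD_SMmin (arr : List Int) {lo hi : Nat} (h : lo ≤ hi) :
    vA arr ((SMG (vA arr) cmpMin lo (hi + 1)).headD 0) = fmin arr lo hi := by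
  have := pv_G4 (vA arr) cmpMin cmpMin_tot cmpMin_trans lo (hi - lo)
  have he : lo + (hi - lo) = hi := by omega
  rw [he] at this
  rw [this]
  unfold fmin
  congr 1
  funext x m
  rw [min_def']
  simp [cmpMin]

-- ---- fold max/min bounds and monotonicity ----
lemma pv_le_foldl_max (arr : List Int) (l : List Nat) :
    ∀ b : Int, b ≤ l.foldl (fun x m => max x (vA arr m)) b := by
  induction l with
  | nil => intro b; simp
  | cons a t ih =>
    intro b
    calc b ≤ max b (vA arr a) := le_max_left _ _
      _ ≤ _ := ih _

lemma pv_foldl_max_mono (arr : List Int) (l : List Nat) :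
    ∀ b b' : Int, b ≤ b' → l.foldl (fun x m => max x (vA arr m)) b ≤
      l.foldl (fun x m => max x (vA arr m)) b' := by
  induction l with
  | nil => intro b b' h; simpa using h
  | cons a t ih =>
    intro b b' h
    exact ih _ _ (max_le_max_right _ h)

lemma pv_mem_le_foldl_max (arr : List Int) (l : List Nat) :
    ∀ (b : Int) (m : Nat), m ∈ l → vA arr m ≤ l.foldl (fun x m => max x (vA arr m)) b := by
  induction l with
  | nil => intro _ _ h; simp at h
  | cons a t ih =>
    intro b m hm
    rcases List.mem_cons.mp hm with hm | hm
    · subst hm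
      calc vA arr m ≤ max b (vA arr m) := le_max_right _ _
        _ ≤ t.foldl (fun x k => max x (vA arr k)) (max b (vA arr m)) := pv_le_foldl_max arr t _
        _ = (m :: t).foldl (fun x k => max x (vA arr k)) b := rfl
    · exact ih _ _ hm

lemma pv_foldl_max_le (arr : List Int) (l : List Nat) :
    ∀ (b c : Int), b ≤ c → (∀ m ∈ l, vA arr m ≤ c) →
      l.foldl (fun x m => max x (vA arr m)) b ≤ c := by
  induction l with
  | nil => intro b c h _; simpa using h
  | cons a t ih =>
    intro b c hb hl
    apply ih
    · exact max_le hb (hl a (by simp))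
    · intro m hm
      exact hl m (by simp [hm])

lemma pv_foldl_min_le (arr : List Int) (l : List Nat) :
    ∀ b : Int, l.foldl (fun x m => min x (vA arr m)) b ≤ b := by
  induction l with
  | nil => intro b; simp
  | cons a t ih =>
    intro b
    calc (a :: t).foldl (fun x m => min x (vA arr m)) b
        = t.foldl (fun x m => min x (vA arr m)) (min b (vA arr a)) := rfl
      _ ≤ min b (vA arr a) := ih _
      _ ≤ b := min_le_left _ _

lemma pv_foldl_min_mono (arr : List Int) (l : List Nat) :
    ∀ b b' : Int, b ≤ b' → l.foldl (fun x m => min x (vA arr m)) b ≤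
      l.foldl (fun x m => min x (vA arr m)) b' := by
  induction l with
  | nil => intro b b' h; simpa using h
  | cons a t ih =>
    intro b b' h
    exact ih _ _ (min_le_min_right _ h)

lemma pv_foldl_min_le_mem (arr : List Int) (l : List Nat) :
    ∀ (b : Int) (m : Nat), m ∈ l → l.foldl (fun x m => min x (vA arr m)) b ≤ vA arr m := by
  induction l with
  | nil => intro _ _ h; simp at h
  | cons a t ih =>
    intro b m hm
    rcases List.mem_cons.mp hm with hm | hm
    · subst hm
      calc (m :: t).foldl (fun x k => min x (vA arr k)) b
          = t.foldl (fun x k => min x (vA arr k)) (min b (vA arr m)) := rfl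
        _ ≤ min b (vA arr m) := pv_foldl_min_le arr t _
        _ ≤ vA arr m := min_le_right _ _
    · exact ih _ _ hm

lemma pv_le_foldl_min (arr : List Int) (l : List Nat) :
    ∀ (b c : Int), c ≤ b → (∀ m ∈ l, c ≤ vA arr m) →
      c ≤ l.foldl (fun x m => min x (vA arr m)) b := by
  induction l with
  | nil => intro b c h _; simpa using h
  | cons a t ih =>
    intro b c hb hl
    apply ih
    · exact le_min hb (hl a (by simp))
    · intro m hm
      exact hl m (by simp [hm])

lemma pv_fmax_split (arr : List Int) {lo mid hi : Nat} (h1 : lo ≤ mid) (h2 : mid ≤ hi) :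
    fmax arr lo hi = (List.range' (mid + 1) (hi - mid)).foldl
      (fun x m => max x (vA arr m)) (fmax arr lo mid) := by
  unfold fmax
  rw [← List.foldl_append]
  congr 1
  have : hi - lo = (mid - lo) + (hi - mid) := by omega
  rw [this, ← List.range'_append]
  have h3 : lo + 1 + 1 * (mid - lo) = mid + 1 := by omega
  rw [h3]

lemma pv_fmin_split (arr : List Int) {lo mid hi : Nat} (h1 : lo ≤ mid) (h2 : mid ≤ hi) :
    fmin arr lo hi = (List.range' (mid + 1) (hi - mid)).foldl
      (fun x m => min x (vA arr m)) (fmin arr lo mid) := by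
  unfold fmin
  rw [← List.foldl_append]
  congr 1
  have : hi - lo = (mid - lo) + (hi - mid) := by omega
  rw [this, ← List.range'_append]
  have h3 : lo + 1 + 1 * (mid - lo) = mid + 1 := by omega
  rw [h3]

lemma pv_fmax_extend (arr : List Int) {lo hi hi' : Nat} (h1 : lo ≤ hi) (h2 : hi ≤ hi') :
    fmax arr lo hi ≤ fmax arr lo hi' := by
  rw [pv_fmax_split arr h1 h2]
  exact pv_le_foldl_max arr _ _

lemma pv_fmin_extend (arr : List Int) {lo hi hi' : Nat} (h1 : lo ≤ hi) (h2 : hi ≤ hi') :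
    fmin arr lo hi' ≤ fmin arr lo hi := by
  rw [pv_fmin_split arr h1 h2]
  exact pv_foldl_min_le arr _ _

lemma pv_self_le_fmax (arr : List Int) {lo lo' : Nat} (h : lo ≤ lo') :
    vA arr lo' ≤ fmax arr lo lo' := by
  rcases Nat.eq_or_lt_of_le h with he | hlt
  · subst he
    unfold fmax
    simp
  · unfold fmax
    apply pv_mem_le_foldl_max
    exact List.mem_range'_1.mpr (by omega)

lemma pv_fmin_le_self (arr : List Int) {lo lo' : Nat} (h : lo ≤ lo') :
    fmin arr lo lo' ≤ vA arr lo' := by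
  rcases Nat.eq_or_lt_of_le h with he | hlt
  · subst he
    unfold fmin
    simp
  · unfold fmin
    apply pv_foldl_min_le_mem
    exact List.mem_range'_1.mpr (by omega)

lemma pv_fmax_shrink (arr : List Int) {lo lo' hi : Nat} (h1 : lo ≤ lo') (h2 : lo' ≤ hi) :
    fmax arr lo' hi ≤ fmax arr lo hi := by
  rw [pv_fmax_split arr h1 h2]
  have hstart : vA arr lo' ≤ fmax arr lo lo' := pv_self_le_fmax arr h1
  calc fmax arr lo' hi = (List.range' (lo' + 1) (hi - lo')).foldl
        (fun x m => max x (vA arr m)) (vA arr lo') := rfl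
    _ ≤ _ := pv_foldl_max_mono arr _ _ _ hstart

lemma pv_fmin_shrink (arr : List Int) {lo lo' hi : Nat} (h1 : lo ≤ lo') (h2 : lo' ≤ hi) :
    fmin arr lo hi ≤ fmin arr lo' hi := by
  rw [pv_fmin_split arr h1 h2]
  have hstart : fmin arr lo lo' ≤ vA arr lo' := pv_fmin_le_self arr h1
  calc (List.range' (lo' + 1) (hi - lo')).foldl (fun x m => min x (vA arr m)) (fmin arr lo lo')
      ≤ (List.range' (lo' + 1) (hi - lo')).foldl (fun x m => min x (vA arr m)) (vA arr lo') :=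
        pv_foldl_min_mono arr _ _ _ hstart
    _ = fmin arr lo' hi := rfl

lemma pv_le_fmax_of_mem (arr : List Int) {lo m hi : Nat} (h1 : lo ≤ m) (h2 : m ≤ hi) :
    vA arr m ≤ fmax arr lo hi := by
  rcases Nat.eq_or_lt_of_le h1 with he | hlt
  · subst he
    unfold fmax
    exact pv_le_foldl_max arr _ _
  · unfold fmax
    apply pv_mem_le_foldl_max
    exact List.mem_range'_1.mpr (by omega)

lemma pv_fmin_le_of_mem (arr : List Int) {lo m hi : Nat} (h1 : lo ≤ m) (h2 : m ≤ hi) :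
    fmin arr lo hi ≤ vA arr m := by
  rcases Nat.eq_or_lt_of_le h1 with he | hlt
  · subst he
    unfold fmin
    exact pv_foldl_min_le arr _ _
  · unfold fmin
    apply pv_foldl_min_le_mem
    exact List.mem_range'_1.mpr (by omega)

lemma pv_fmax_le (arr : List Int) {lo hi : Nat} (c : Int) (hlh : lo ≤ hi)
    (h : ∀ m, lo ≤ m → m ≤ hi → vA arr m ≤ c) : fmax arr lo hi ≤ c := by
  unfold fmax
  apply pv_foldl_max_le
  · exact h lo (le_refl lo) (by omega)
  · intro m hm
    obtain ⟨ha, hb⟩ := List.mem_range'_1.mp hm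
    exact h m (by omega) (by omega)

lemma pv_le_fmin (arr : List Int) {lo hi : Nat} (c : Int) (hlh : lo ≤ hi)
    (h : ∀ m, lo ≤ m → m ≤ hi → c ≤ vA arr m) : c ≤ fmin arr lo hi := by
  unfold fmin
  apply pv_le_foldl_min
  · exact h lo (le_refl lo) (by omega)
  · intro m hm
    obtain ⟨ha, hb⟩ := List.mem_range'_1.mp hm
    exact h m (by omega) (by omega)

lemma combMax_eq (a b : Int) : combMax a b = max a b := by
  unfold combMax
  rw [max_def]
  split_ifs <;> omega

lemma combMin_eq (a b : Int) : combMin a b = min a b := by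
  unfold combMin
  rw [min_def]

-- the overlapping-cover identity that makes sparse-table queries exact
lemma pv_fmax_overlap (arr : List Int) {lo m1 m2 hi : Nat}
    (h1 : lo ≤ m1) (h2 : m1 ≤ hi) (h3 : lo ≤ m2) (h4 : m2 ≤ m1 + 1) (h5 : m2 ≤ hi) :
    combMax (fmax arr lo m1) (fmax arr m2 hi) = fmax arr lo hi := by
  rw [combMax_eq]
  apply le_antisymm
  · exact max_le (pv_fmax_extend arr h1 h2) (pv_fmax_shrink arr h3 h5)
  · apply pv_fmax_le arr _ (by omega)
    intro m hm1 hm2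
    by_cases hc : m ≤ m1
    · exact le_trans (pv_le_fmax_of_mem arr hm1 hc) (le_max_left _ _)
    · exact le_trans (pv_le_fmax_of_mem arr (lo := m2) (by omega) hm2) (le_max_right _ _)

lemma pv_fmin_overlap (arr : List Int) {lo m1 m2 hi : Nat}
    (h1 : lo ≤ m1) (h2 : m1 ≤ hi) (h3 : lo ≤ m2) (h4 : m2 ≤ m1 + 1) (h5 : m2 ≤ hi) :
    combMin (fmin arr lo m1) (fmin arr m2 hi) = fmin arr lo hi := by
  rw [combMin_eq]
  apply le_antisymm
  · apply pv_le_fmin arr _ (by omega)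
    intro m hm1 hm2
    by_cases hc : m ≤ m1
    · exact le_trans (min_le_left _ _) (pv_fmin_le_of_mem arr hm1 hc)
    · exact le_trans (min_le_right _ _) (pv_fmin_le_of_mem arr (lo := m2) (by omega) hm2)
  · exact le_min (pv_fmin_extend arr h1 h2) (pv_fmin_shrink arr h3 h5)

-- ---- the window predicate and the frontier function ----
def badB (arr : List Int) (num : Int) (i t : Nat) : Bool :=
  decide (fmax arr i t - fmin arr i t > num)

def Fidx (arr : List Int) (num : Int) (n i : Nat) : Nat :=
  ((List.range' i (n - i)).find? (fun t => badB arr num i t)).getD n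

lemma pv_bad_self (arr : List Int) {num : Int} (hnum : 0 ≤ num) (i : Nat) :
    badB arr num i i = false := by
  unfold badB fmax fmin
  rw [Nat.sub_self]
  simp only [List.range', List.foldl_nil]
  simp
  omega

lemma pv_bad_extend (arr : List Int) (num : Int) {i t t' : Nat} (h1 : i ≤ t) (h2 : t ≤ t')
    (hb : badB arr num i t = true) : badB arr num i t' = true := by
  unfold badB at *
  simp only [decide_eq_true_eq] at *
  have := pv_fmax_extend arr h1 h2
  have := pv_fmin_extend arr h1 h2
  omega

lemma pv_bad_shrink (arr : List Int) (num : Int) {i i' t' t : Nat} (h1 : i ≤ i') (h2 : i' ≤ t')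
    (h3 : t' ≤ t) (hb : badB arr num i' t' = true) : badB arr num i t = true := by
  unfold badB at *
  simp only [decide_eq_true_eq] at *
  have ha := pv_fmax_shrink arr h1 h2
  have hb2 := pv_fmin_shrink arr h1 h2
  have hc := pv_fmax_extend arr (le_trans h1 h2) h3
  have hd := pv_fmin_extend arr (le_trans h1 h2) h3
  omega

-- ---- find? on range': first-hit characterisation ----
lemma pv_find?_range'_prefix {p : Nat → Bool} : ∀ (n s j : Nat),
    (List.range' s n).find? p = some j → ∀ t, s ≤ t → t < j → p t = false := by
  intro n
  induction n with
  | zero => intro s j h; simp [List.range'] at h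
  | succ n ih =>
    intro s j h t hst htj
    rw [List.range'_succ] at h
    by_cases hs : p s = true
    · rw [List.find?_cons_of_pos hs] at h
      have : j = s := by injection h; omega
      omega
    · have hsf : p s = false := by simpa using hs
      rw [List.find?_cons_of_neg (by simp [hsf])] at h
      rcases Nat.eq_or_lt_of_le hst with he | hlt
      · subst he; exact hsf
      · exact ih (s + 1) j h t hlt htj

lemma pv_find?_range'_first {p : Nat → Bool} : ∀ (n s j : Nat),
    (∀ t, s ≤ t → t < j → p t = false) → p j = true → s ≤ j → j < s + n →
    (List.range' s n).find? p = some j := by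
  intro n
  induction n with
  | zero => intro s j _ _ _ h; omega
  | succ n ih =>
    intro s j hpre hj hsj hjn
    rw [List.range'_succ]
    rcases Nat.eq_or_lt_of_le hsj with he | hlt
    · subst he
      rw [List.find?_cons_of_pos hj]
    · rw [List.find?_cons_of_neg (by simp [hpre s (le_refl s) hlt])]
      exact ih (s + 1) j (fun t ht => hpre t (by omega)) hj hlt (by omega)

lemma pv_Fidx_ge (arr : List Int) (num : Int) {n i : Nat} (h : i ≤ n) : i ≤ Fidx arr num n i := by
  unfold Fidx
  cases hf : (List.range' i (n - i)).find? (fun t => badB arr num i t) with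
  | none => simpa using h
  | some j =>
    have := List.mem_range'_1.mp (List.mem_of_find?_eq_some hf)
    simpa using this.1

lemma pv_Fidx_le (arr : List Int) (num : Int) {n i : Nat} (h : i ≤ n) : Fidx arr num n i ≤ n := by
  unfold Fidx
  cases hf : (List.range' i (n - i)).find? (fun t => badB arr num i t) with
  | none => simp
  | some j =>
    have := List.mem_range'_1.mp (List.mem_of_find?_eq_some hf)
    simp
    omega

lemma pv_Fidx_prefix (arr : List Int) (num : Int) {n i : Nat} (h : i ≤ n) :
    ∀ t, i ≤ t → t < Fidx arr num n i → badB arr num i t = false := by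
  unfold Fidx
  cases hf : (List.range' i (n - i)).find? (fun t => badB arr num i t) with
  | none =>
    intro t h1 h2
    simp only [Option.getD_none] at h2
    have := List.find?_eq_none.mp hf t (List.mem_range'_1.mpr (by omega))
    simpa using this
  | some j =>
    intro t h1 h2
    simp only [Option.getD_some] at h2
    exact pv_find?_range'_prefix _ _ _ hf t h1 h2

lemma pv_Fidx_bad (arr : List Int) (num : Int) {n i : Nat} (h : Fidx arr num n i < n) :
    badB arr num i (Fidx arr num n i) = true := by
  unfold Fidx at *
  cases hf : (List.range' i (n - i)).find? (fun t => badB arr num i t) with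
  | none => rw [hf] at h; simp at h
  | some j =>
    simpa using List.find?_some hf

lemma pv_Fidx_eq_of (arr : List Int) (num : Int) {n i j : Nat}
    (hpre : ∀ t, i ≤ t → t < j → badB arr num i t = false)
    (hj : badB arr num i j = true) (hij : i ≤ j) (hjn : j < n) : Fidx arr num n i = j := by
  unfold Fidx
  rw [pv_find?_range'_first (n - i) i j hpre hj hij (by omega)]
  rfl

lemma pv_Fidx_none (arr : List Int) (num : Int) {n i : Nat}
    (hpre : ∀ t, i ≤ t → t < n → badB arr num i t = false) : Fidx arr num n i = n := by
  unfold Fidx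
  rw [List.find?_eq_none.mpr ?_]
  · rfl
  · intro t ht
    have := List.mem_range'_1.mp ht
    simp [hpre t this.1 (by omega)]

lemma pv_Fidx_gt (arr : List Int) {num : Int} (hnum : 0 ≤ num) {n i : Nat} (h : i < n) :
    i < Fidx arr num n i := by
  rcases Nat.lt_or_ge i (Fidx arr num n i) with hc | hc
  · exact hc
  · exfalso
    have hge := pv_Fidx_ge arr num (n := n) (i := i) (by omega)
    have heq : Fidx arr num n i = i := by omega
    have := pv_Fidx_bad arr num (n := n) (i := i) (by omega)
    rw [heq] at this
    rw [pv_bad_self arr hnum i] at this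
    exact Bool.false_ne_true this

-- ---- bridges between A's value-index pair deques and index lists ----
lemma pv_pairize_append (arr : List Int) (l1 l2 : List Nat) :
    pairize arr (l1 ++ l2) = pairize arr l1 ++ pairize arr l2 := by
  unfold pairize
  simp

lemma pv_pairize_dropWhile (arr : List Int) (i : Nat) (l : List Nat) :
    (pairize arr l).dropWhile (fun p => decide (p.2 < i)) =
      pairize arr (l.dropWhile (fun k => decide (k < i))) := by
  unfold pairize
  rw [List.dropWhile_map]
  rfl

lemma pv_pairize_revDrop_max (arr : List Int) (w : Int) (l : List Nat) :
    pvRevDrop (fun p => decide (p.1 ≤ w)) (pairize arr l) =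
      pairize arr (pvRevDropN (fun k => cmpMax (vA arr k) w) l) := by
  unfold pvRevDrop pvRevDropN pairize
  rw [← List.map_reverse, List.dropWhile_map, ← List.map_reverse]
  rfl

lemma pv_pairize_revDrop_min (arr : List Int) (w : Int) (l : List Nat) :
    pvRevDrop (fun p => decide (w ≤ p.1)) (pairize arr l) =
      pairize arr (pvRevDropN (fun k => cmpMin (vA arr k) w) l) := by
  unfold pvRevDrop pvRevDropN pairize
  rw [← List.map_reverse, List.dropWhile_map, ← List.map_reverse]
  rfl

lemma pv_pairize_headD (arr : List Int) (l : List Nat) (h : l ≠ []) :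
    ((pairize arr l).headD (0, 0)).1 = vA arr (l.headD 0) := by
  cases l with
  | nil => exact absurd rfl h
  | cons a t => rfl

-- ---- the inner `while j < len(arr)` loop of A computes the first bad endpoint ----
lemma pv_innA (arr : List Int) (num : Int) (n i : Nat) :
    ∀ (fuel : Nat) (j : Nat) (maxd mind : List (Int × Nat)) (E : Nat),
    n ≤ j + fuel → i ≤ j → j ≤ n →
    (∀ t, i ≤ t → t < j → badB arr num i t = false) →
    (E = j ∨ (j < n ∧ E = j + 1)) →
    maxd.dropWhile (fun p => decide (p.2 < i)) = pairize arr (SMG (vA arr) cmpMax i E) →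
    mind.dropWhile (fun p => decide (p.2 < i)) = pairize arr (SMG (vA arr) cmpMin i E) →
    ∃ maxd' mind',
      pvInnerA arr num n i fuel j maxd mind =
        (Fidx arr num n i, maxd', mind', decide (Fidx arr num n i < n),
          if Fidx arr num n i < n then ((Fidx arr num n i : Int) - (i : Int)) else 0) ∧
      maxd'.dropWhile (fun p => decide (p.2 < i)) =
        pairize arr (SMG (vA arr) cmpMax i
          (if Fidx arr num n i < n then Fidx arr num n i + 1 else n)) ∧
      mind'.dropWhile (fun p => decide (p.2 < i)) =
        pairize arr (SMG (vA arr) cmpMin i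
          (if Fidx arr num n i < n then Fidx arr num n i + 1 else n)) := by
  intro fuel
  induction fuel with
  | zero =>
    intro j maxd mind E hfuel hij hjn hvalid hE hmaxd hmind
    have hjj : j = n := by omega
    have hF : Fidx arr num n i = n := by
      apply pv_Fidx_none arr num
      intro t h1 h2
      exact hvalid t h1 (by omega)
    have hEn : E = n := by rcases hE with hE | hE <;> omega
    refine ⟨maxd, mind, ?_, ?_, ?_⟩
    · show (j, maxd, mind, false, (0 : Int)) = _
      rw [hjj, hF]
      simp
    · rw [hF]
      simp only [lt_irrefl, if_false]
      rw [← hEn]; exact hmaxd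
    · rw [hF]
      simp only [lt_irrefl, if_false]
      rw [← hEn]; exact hmind
  | succ fuel ih =>
    intro j maxd mind E hfuel hij hjn hvalid hE hmaxd hmind
    by_cases hjn' : j < n
    · have hmaxd2 : pvRevDrop (fun p => decide (p.1 ≤ arr.getD j 0))
          (maxd.dropWhile (fun p => decide (p.2 < i))) ++ [(arr.getD j 0, j)] =
          pairize arr (SMG (vA arr) cmpMax i (j + 1)) := by
        rw [hmaxd, pv_pairize_revDrop_max]
        show pairize arr _ ++ pairize arr [j] = _
        rw [← pv_pairize_append]
        congr 1
        rcases hE with hE | hE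
        · subst hE
          exact pv_G1 (vA arr) cmpMax cmpMax_tot cmpMax_trans hij
        · rcases hE with ⟨_, hE⟩
          subst hE
          exact pv_G3 (vA arr) cmpMax cmpMax_refl cmpMax_tot cmpMax_trans hij
      have hmind2 : pvRevDrop (fun p => decide (arr.getD j 0 ≤ p.1))
          (mind.dropWhile (fun p => decide (p.2 < i))) ++ [(arr.getD j 0, j)] =
          pairize arr (SMG (vA arr) cmpMin i (j + 1)) := by
        rw [hmind, pv_pairize_revDrop_min]
        show pairize arr _ ++ pairize arr [j] = _
        rw [← pv_pairize_append]
        congr 1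
        rcases hE with hE | hE
        · subst hE
          exact pv_G1 (vA arr) cmpMin cmpMin_tot cmpMin_trans hij
        · rcases hE with ⟨_, hE⟩
          subst hE
          exact pv_G3 (vA arr) cmpMin cmpMin_refl cmpMin_tot cmpMin_trans hij
      have hmaxhead : ((pairize arr (SMG (vA arr) cmpMax i (j + 1))).headD (0, 0)).1 =
          fmax arr i j := by
        rw [pv_pairize_headD arr _ (pv_SMG_ne_nil (vA arr) cmpMax hij)]
        exact pv_headD_SMmax arr hij
      have hminhead : ((pairize arr (SMG (vA arr) cmpMin i (j + 1))).headD (0, 0)).1 =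
          fmin arr i j := by
        rw [pv_pairize_headD arr _ (pv_SMG_ne_nil (vA arr) cmpMin hij)]
        exact pv_headD_SMmin arr hij
      have hunfold : pvInnerA arr num n i (fuel + 1) j maxd mind =
          if fmax arr i j - fmin arr i j > num then
            (j, pairize arr (SMG (vA arr) cmpMax i (j + 1)),
              pairize arr (SMG (vA arr) cmpMin i (j + 1)), true, (j : Int) - (i : Int))
          else
            pvInnerA arr num n i fuel (j + 1) (pairize arr (SMG (vA arr) cmpMax i (j + 1)))
              (pairize arr (SMG (vA arr) cmpMin i (j + 1))) := by
        show (if j < n then _ else _) = _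
        rw [if_pos hjn']
        simp only [hmaxd2, hmind2, hmaxhead, hminhead]
      by_cases hbad : badB arr num i j = true
      · have hgt : fmax arr i j - fmin arr i j > num := by
          unfold badB at hbad
          exact decide_eq_true_eq.mp hbad
        have hF : Fidx arr num n i = j := pv_Fidx_eq_of arr num hvalid hbad hij hjn'
        refine ⟨pairize arr (SMG (vA arr) cmpMax i (j + 1)),
          pairize arr (SMG (vA arr) cmpMin i (j + 1)), ?_, ?_, ?_⟩
        · rw [hunfold, if_pos hgt, hF]
          simp [hjn']
        · rw [hF, if_pos hjn', pv_pairize_dropWhile, pv_G2 (vA arr) cmpMax (le_refl i)]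
        · rw [hF, if_pos hjn', pv_pairize_dropWhile, pv_G2 (vA arr) cmpMin (le_refl i)]
      · have hbadf : badB arr num i j = false := by simpa using hbad
        have hngt : ¬ (fmax arr i j - fmin arr i j > num) := by
          unfold badB at hbadf
          simpa using hbadf
        rw [hunfold, if_neg hngt]
        apply ih (j + 1) _ _ (j + 1) (by omega) (by omega) (by omega)
        · intro t h1 h2
          rcases Nat.lt_or_ge t j with h3 | h3
          · exact hvalid t h1 h3
          · have : t = j := by omega
            subst this
            exact hbadf
        · left; rfl
        · rw [pv_pairize_dropWhile, pv_G2 (vA arr) cmpMax (le_refl i)]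
        · rw [pv_pairize_dropWhile, pv_G2 (vA arr) cmpMin (le_refl i)]
    · have hjj : j = n := by omega
      have hF : Fidx arr num n i = n := by
        apply pv_Fidx_none arr num
        intro t h1 h2
        exact hvalid t h1 (by omega)
      have hEn : E = n := by rcases hE with hE | hE <;> omega
      refine ⟨maxd, mind, ?_, ?_, ?_⟩
      · show (if j < n then _ else (j, maxd, mind, false, (0 : Int))) = _
        rw [if_neg hjn', hjj, hF]
        simp
      · rw [hF]
        simp only [lt_irrefl, if_false]
        rw [← hEn]; exact hmaxd
      · rw [hF]
        simp only [lt_irrefl, if_false]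
        rw [← hEn]; exact hmind

-- ---- the outer `for i in range(len(arr))` loop of A ----
def pvStepA (arr : List Int) (num : Int) (n : Nat) :
    (Int × Nat × List (Int × Nat) × List (Int × Nat)) → Nat →
      (Int × Nat × List (Int × Nat) × List (Int × Nat)) :=
  fun st i => match st with
  | (ans, j, maxd, mind) =>
    match pvInnerA arr num n i (n - j) j maxd mind with
    | (j', maxd', mind', flag, d) =>
      let ans1 := ans + d
      let ans2 := if flag then ans1 else ans1 + ((j' : Int) - (i : Int))
      (ans2, j', maxd', mind')

lemma pv_A_eq_fold (arr : List Int) (num : Int) :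
    max_min_subarr arr num =
      ((List.range arr.length).foldl (pvStepA arr num arr.length) (0, 0, [], [])).1 := rfl

lemma pv_outerA (arr : List Int) {num : Int} (hnum : 0 ≤ num) :
    ∀ m, m ≤ arr.length →
    ∃ maxd mind,
      (List.range m).foldl (pvStepA arr num arr.length) (0, 0, [], []) =
        (∑ i ∈ Finset.range m, ((Fidx arr num arr.length i : Int) - (i : Int)),
          (if m = 0 then 0 else Fidx arr num arr.length (m - 1)), maxd, mind) ∧
      maxd.dropWhile (fun p => decide (p.2 < m)) =
        pairize arr (SMG (vA arr) cmpMax m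
          (if m = 0 then 0 else
            (if Fidx arr num arr.length (m - 1) < arr.length then
              Fidx arr num arr.length (m - 1) + 1 else arr.length))) ∧
      mind.dropWhile (fun p => decide (p.2 < m)) =
        pairize arr (SMG (vA arr) cmpMin m
          (if m = 0 then 0 else
            (if Fidx arr num arr.length (m - 1) < arr.length then
              Fidx arr num arr.length (m - 1) + 1 else arr.length))) := by
  intro m
  induction m with
  | zero =>
    intro _
    refine ⟨[], [], ?_, ?_, ?_⟩
    · simp
    · show ([] : List (Int × Nat)) = pairize arr (SMG (vA arr) cmpMax 0 0)
      unfold SMG pairize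
      simp
    · show ([] : List (Int × Nat)) = pairize arr (SMG (vA arr) cmpMin 0 0)
      unfold SMG pairize
      simp
  | succ m ih =>
    intro hm
    set n := arr.length with hn
    obtain ⟨maxd, mind, hfold, hmaxd, hmind⟩ := ih (by omega)
    set J := if m = 0 then 0 else Fidx arr num n (m - 1) with hJ
    set E := if m = 0 then 0 else (if Fidx arr num n (m - 1) < n then
      Fidx arr num n (m - 1) + 1 else n) with hE
    have hFle : m ≠ 0 → Fidx arr num n (m - 1) ≤ n := by
      intro h0
      exact pv_Fidx_le arr num (by omega)
    have hFgt : m ≠ 0 → m - 1 < Fidx arr num n (m - 1) := by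
      intro h0
      exact pv_Fidx_gt arr hnum (by omega)
    have hmJ : m ≤ J := by
      rw [hJ]
      by_cases h0 : m = 0
      · simp [h0]
      · rw [if_neg h0]
        have := hFgt h0
        omega
    have hJn : J ≤ n := by
      rw [hJ]
      by_cases h0 : m = 0
      · simp [h0]
      · rw [if_neg h0]
        exact hFle h0
    have hEJ : E = J ∨ (J < n ∧ E = J + 1) := by
      rw [hE, hJ]
      by_cases h0 : m = 0
      · left
        simp [h0]
      · by_cases hc : Fidx arr num n (m - 1) < n
        · right
          simp [h0, hc]
        · left
          have := hFle h0
          simp only [if_neg h0, if_neg hc]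
          omega
    have hvalid : ∀ t, m ≤ t → t < J → badB arr num m t = false := by
      intro t h1 h2
      rw [hJ] at h2
      by_cases h0 : m = 0
      · rw [if_pos h0] at h2
        omega
      · rw [if_neg h0] at h2
        by_contra hc
        have hbt : badB arr num m t = true := by simpa using hc
        have := pv_bad_shrink arr num (i := m - 1) (i' := m) (t' := t) (t := t)
          (by omega) h1 (le_refl t) hbt
        have hpre := pv_Fidx_prefix arr num (n := n) (i := m - 1) (by omega) t (by omega) h2
        rw [hpre] at this
        exact Bool.false_ne_true this
    obtain ⟨maxd', mind', hinner, hmaxd', hmind'⟩ :=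
      pv_innA arr num n m (n - J) J maxd mind E (by omega) hmJ hJn hvalid hEJ hmaxd hmind
    refine ⟨maxd', mind', ?_, ?_, ?_⟩
    · rw [List.range_succ, List.foldl_append, hfold]
      unfold pvStepA
      rw [Finset.sum_range_succ]
      by_cases hc : Fidx arr num n m < n
      · simp [hinner, hc]
      · have hFn : Fidx arr num n m = n := by
          have := pv_Fidx_le arr num (n := n) (i := m) (by omega)
          omega
        simp [hinner, hc]
    · have hcomp := pv_dropWhile_dropWhile (fun p : Int × Nat => decide (p.2 < m + 1))
        (fun p : Int × Nat => decide (p.2 < m)) maxd' (by intro x hx; simp at *; omega)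
      rw [← hcomp, hmaxd', pv_pairize_dropWhile, pv_G2 (vA arr) cmpMax (Nat.le_succ m)]
      norm_num
    · have hcomp := pv_dropWhile_dropWhile (fun p : Int × Nat => decide (p.2 < m + 1))
        (fun p : Int × Nat => decide (p.2 < m)) mind' (by intro x hx; simp at *; omega)
      rw [← hcomp, hmind', pv_pairize_dropWhile, pv_G2 (vA arr) cmpMin (Nat.le_succ m)]
      norm_num

lemma pv_A_value (arr : List Int) {num : Int} (hnum : 0 ≤ num) :
    max_min_subarr arr num =
      ∑ i ∈ Finset.range arr.length, ((Fidx arr num arr.length i : Int) - (i : Int)) := by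
  obtain ⟨maxd, mind, hfold, _, _⟩ := pv_outerA arr hnum arr.length (le_refl _)
  rw [pv_A_eq_fold, hfold]

-- ---- B: sparse-table levels ----
def lvlG (g : Nat → Nat → Int) (n k : Nat) : List Int :=
  (List.range (n - 2 ^ k + 1)).map (fun i => g i (i + 2 ^ k - 1))

lemma pv_lvlG_getD (g : Nat → Nat → Int) (n k i : Nat) (h : i + 2 ^ k ≤ n) :
    (lvlG g n k).getD i 0 = g i (i + 2 ^ k - 1) := by
  have h1 : 1 ≤ 2 ^ k := Nat.one_le_two_pow
  have hlt : i < n - 2 ^ k + 1 := by omega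
  unfold lvlG
  rw [List.getD_eq_getElem?_getD, List.getElem?_map, List.getElem?_range hlt]
  rfl

lemma pv_build_getD (n : Nat) (comb : Int → Int → Int) (g : Nat → Nat → Int)
    (hcomb : ∀ lo m hi, lo ≤ m → m < hi → comb (g lo m) (g (m + 1) hi) = g lo hi) :
    ∀ (fuel k j : Nat), 1 ≤ k → 2 ^ (k + j) ≤ n → j < fuel →
    (pvBuildLvls n comb fuel k (lvlG g n (k - 1))).getD j [] = lvlG g n (k + j) := by
  intro fuel
  induction fuel with
  | zero => intro k j _ _ h; omega
  | succ fuel ih =>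
    intro k j hk hpow hj
    have hk2 : 2 ^ k ≤ n := le_trans (Nat.pow_le_pow_right (by omega) (by omega)) hpow
    have hhalf1 : 1 ≤ 2 ^ (k - 1) := Nat.one_le_two_pow
    have hmul : 2 ^ (k - 1) * 2 = 2 ^ k := by
      rw [← pow_succ]
      congr 1
      omega
    have h2k : 2 ^ k = 2 ^ (k - 1) + 2 ^ (k - 1) := by omega
    have hcur : (List.range (n - 2 ^ k + 1)).map
        (fun i => comb ((lvlG g n (k - 1)).getD i 0) ((lvlG g n (k - 1)).getD (i + 2 ^ (k - 1)) 0)) =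
        lvlG g n k := by
      rw [show lvlG g n k = (List.range (n - 2 ^ k + 1)).map (fun i => g i (i + 2 ^ k - 1)) from rfl]
      apply List.map_congr_left
      intro i hi
      have hi2 := List.mem_range.mp hi
      have hb1 : i + 2 ^ (k - 1) ≤ n := by omega
      have hb2 : (i + 2 ^ (k - 1)) + 2 ^ (k - 1) ≤ n := by omega
      rw [pv_lvlG_getD g n (k - 1) i hb1, pv_lvlG_getD g n (k - 1) (i + 2 ^ (k - 1)) hb2]
      have hm1 : i + 2 ^ (k - 1) = (i + 2 ^ (k - 1) - 1) + 1 := by omega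
      have heq := hcomb i (i + 2 ^ (k - 1) - 1) (i + 2 ^ k - 1) (by omega) (by omega)
      rw [← hm1] at heq
      have he2 : i + 2 ^ (k - 1) + 2 ^ (k - 1) - 1 = i + 2 ^ k - 1 := by omega
      rw [he2]
      exact heq
    rw [pvBuildLvls, if_pos hk2]
    show (((List.range (n - 2 ^ k + 1)).map
        (fun i => comb ((lvlG g n (k - 1)).getD i 0) ((lvlG g n (k - 1)).getD (i + 2 ^ (k - 1)) 0))) ::
      pvBuildLvls n comb fuel (k + 1)
        ((List.range (n - 2 ^ k + 1)).map
          (fun i => comb ((lvlG g n (k - 1)).getD i 0)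
            ((lvlG g n (k - 1)).getD (i + 2 ^ (k - 1)) 0)))).getD j [] = lvlG g n (k + j)
    rw [hcur]
    cases j with
    | zero => rfl
    | succ j' =>
      show (pvBuildLvls n comb fuel (k + 1) (lvlG g n k)).getD j' [] = _
      have hkk : lvlG g n k = lvlG g n ((k + 1) - 1) := by norm_num
      rw [hkk]
      have hres := ih (k + 1) j' (by omega) (by rw [show k + 1 + j' = k + (j' + 1) by omega]; exact hpow) (by omega)
      rw [hres]
      congr 1
      omega

lemma pv_arr_eq_lvl0 (arr : List Int) (g : Nat → Nat → Int)
    (hg : ∀ i, g i i = vA arr i) (hn : 1 ≤ arr.length) :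
    arr = lvlG g arr.length 0 := by
  apply List.ext_getElem
  · unfold lvlG
    simp
    omega
  · intro i h1 h2
    unfold lvlG
    simp only [pow_zero]
    rw [List.getElem_map, List.getElem_range]
    have : i + 1 - 1 = i := by omega
    rw [this, hg i]
    unfold vA
    rw [List.getD_eq_getElem?_getD, List.getElem?_eq_getElem h1]
    rfl

lemma pv_tbl_getD (arr : List Int) (comb : Int → Int → Int) (g : Nat → Nat → Int)
    (hcomb : ∀ lo m hi, lo ≤ m → m < hi → comb (g lo m) (g (m + 1) hi) = g lo hi)
    (hg : ∀ i, g i i = vA arr i) (hn : 1 ≤ arr.length) :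
    ∀ k, 2 ^ k ≤ arr.length →
      ((arr :: pvBuildLvls arr.length comb arr.length 1 arr).getD k []) =
        lvlG g arr.length k := by
  intro k hk
  cases k with
  | zero => exact pv_arr_eq_lvl0 arr g hg hn
  | succ k' =>
    show (pvBuildLvls arr.length comb arr.length 1 arr).getD k' [] = _
    have hprev : arr = lvlG g arr.length (1 - 1) := pv_arr_eq_lvl0 arr g hg hn
    have hklt : k' < arr.length := by
      have h1 : k' + 1 < 2 ^ (k' + 1) := Nat.lt_two_pow_self
      omega
    calc (pvBuildLvls arr.length comb arr.length 1 arr).getD k' []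
        = (pvBuildLvls arr.length comb arr.length 1 (lvlG g arr.length (1 - 1))).getD k' [] := by
          rw [← hprev]
      _ = lvlG g arr.length (1 + k') := pv_build_getD arr.length comb g hcomb arr.length 1 k'
            (le_refl 1) (by rw [show 1 + k' = k' + 1 by omega]; exact hk) hklt
      _ = lvlG g arr.length (k' + 1) := by rw [Nat.add_comm]

-- ---- B: query correctness ----
lemma pv_q_max (arr : List Int) {i t : Nat} (hit : i ≤ t) (htn : t < arr.length) :
    pvQ (arr :: pvBuildLvls arr.length combMax arr.length 1 arr) combMax i t = fmax arr i t := by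
  have hn1 : 1 ≤ arr.length := by omega
  set len := t - i + 1 with hlen
  have hlen1 : len ≠ 0 := by omega
  set k := Nat.log2 len with hk
  have hlow : 2 ^ k ≤ len := Nat.log2_self_le hlen1
  have hhigh : len < 2 ^ (k + 1) := Nat.lt_log2_self
  have hkn : 2 ^ k ≤ arr.length := by omega
  have htbl := pv_tbl_getD arr combMax (fun lo hi => fmax arr lo hi)
    (fun lo m hi h1 h2 => pv_fmax_overlap arr h1 (by omega) (by omega) (by omega) (by omega))
    (fun i => by show fmax arr i i = vA arr i; unfold fmax; rw [Nat.sub_self]; rfl) hn1 k hkn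
  show combMax (((arr :: pvBuildLvls arr.length combMax arr.length 1 arr).getD k []).getD i 0)
      (((arr :: pvBuildLvls arr.length combMax arr.length 1 arr).getD k []).getD (t + 1 - 2 ^ k) 0) = _
  rw [htbl]
  have h2k1 : 1 ≤ 2 ^ k := Nat.one_le_two_pow
  rw [pv_lvlG_getD _ _ _ _ (by omega), pv_lvlG_getD _ _ _ _ (by omega)]
  have he : t + 1 - 2 ^ k + 2 ^ k - 1 = t := by omega
  rw [he]
  exact pv_fmax_overlap arr (by omega) (by omega) (by omega) (by omega) (by omega)

lemma pv_q_min (arr : List Int) {i t : Nat} (hit : i ≤ t) (htn : t < arr.length) :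
    pvQ (arr :: pvBuildLvls arr.length combMin arr.length 1 arr) combMin i t = fmin arr i t := by
  have hn1 : 1 ≤ arr.length := by omega
  set len := t - i + 1 with hlen
  have hlen1 : len ≠ 0 := by omega
  set k := Nat.log2 len with hk
  have hlow : 2 ^ k ≤ len := Nat.log2_self_le hlen1
  have hhigh : len < 2 ^ (k + 1) := Nat.lt_log2_self
  have hkn : 2 ^ k ≤ arr.length := by omega
  have htbl := pv_tbl_getD arr combMin (fun lo hi => fmin arr lo hi)
    (fun lo m hi h1 h2 => pv_fmin_overlap arr h1 (by omega) (by omega) (by omega) (by omega))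
    (fun i => by show fmin arr i i = vA arr i; unfold fmin; rw [Nat.sub_self]; rfl) hn1 k hkn
  show combMin (((arr :: pvBuildLvls arr.length combMin arr.length 1 arr).getD k []).getD i 0)
      (((arr :: pvBuildLvls arr.length combMin arr.length 1 arr).getD k []).getD (t + 1 - 2 ^ k) 0) = _
  rw [htbl]
  have h2k1 : 1 ≤ 2 ^ k := Nat.one_le_two_pow
  rw [pv_lvlG_getD _ _ _ _ (by omega), pv_lvlG_getD _ _ _ _ (by omega)]
  have he : t + 1 - 2 ^ k + 2 ^ k - 1 = t := by omega
  rw [he]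
  exact pv_fmin_overlap arr (by omega) (by omega) (by omega) (by omega) (by omega)

-- ---- B: binary search finds the first bad endpoint ----
lemma pv_bs (arr : List Int) (num : Int) (i : Nat) :
    ∀ (fuel lo hi : Nat), i ≤ lo → lo ≤ hi → hi ≤ arr.length → hi - lo < fuel →
    (∀ t, i ≤ t → t < lo → badB arr num i t = false) →
    (∀ t, hi ≤ t → t < arr.length → badB arr num i t = true) →
    pvBSearch num (arr :: pvBuildLvls arr.length combMax arr.length 1 arr)
        (arr :: pvBuildLvls arr.length combMin arr.length 1 arr) i fuel lo hi =
      Fidx arr num arr.length i := by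
  intro fuel
  induction fuel with
  | zero => intro lo hi _ _ _ h; omega
  | succ fuel ih =>
    intro lo hi hil hlh hhn hfuel hpre hsuf
    by_cases hlt : lo < hi
    · have hmid1 : lo ≤ (lo + hi) / 2 := by omega
      have hmid2 : (lo + hi) / 2 < hi := by omega
      have hq1 := pv_q_max arr (i := i) (t := (lo + hi) / 2) (by omega) (by omega)
      have hq2 := pv_q_min arr (i := i) (t := (lo + hi) / 2) (by omega) (by omega)
      have hunfold : pvBSearch num (arr :: pvBuildLvls arr.length combMax arr.length 1 arr)
          (arr :: pvBuildLvls arr.length combMin arr.length 1 arr) i (fuel + 1) lo hi =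
          if fmax arr i ((lo + hi) / 2) - fmin arr i ((lo + hi) / 2) > num then
            pvBSearch num (arr :: pvBuildLvls arr.length combMax arr.length 1 arr)
              (arr :: pvBuildLvls arr.length combMin arr.length 1 arr) i fuel lo ((lo + hi) / 2)
          else
            pvBSearch num (arr :: pvBuildLvls arr.length combMax arr.length 1 arr)
              (arr :: pvBuildLvls arr.length combMin arr.length 1 arr) i fuel ((lo + hi) / 2 + 1) hi := by
        rw [pvBSearch, if_pos hlt]
        show (if pvQ (arr :: pvBuildLvls arr.length combMax arr.length 1 arr) combMax i ((lo + hi) / 2)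
            - pvQ (arr :: pvBuildLvls arr.length combMin arr.length 1 arr) combMin i ((lo + hi) / 2) > num then
            pvBSearch num (arr :: pvBuildLvls arr.length combMax arr.length 1 arr)
              (arr :: pvBuildLvls arr.length combMin arr.length 1 arr) i fuel lo ((lo + hi) / 2)
          else
            pvBSearch num (arr :: pvBuildLvls arr.length combMax arr.length 1 arr)
              (arr :: pvBuildLvls arr.length combMin arr.length 1 arr) i fuel ((lo + hi) / 2 + 1) hi) = _
        rw [hq1, hq2]
      by_cases hbad : badB arr num i ((lo + hi) / 2) = true
      · have hgt : fmax arr i ((lo + hi) / 2) - fmin arr i ((lo + hi) / 2) > num := by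
          unfold badB at hbad
          exact decide_eq_true_eq.mp hbad
        rw [hunfold, if_pos hgt]
        apply ih lo ((lo + hi) / 2) hil (by omega) (by omega) (by omega) hpre
        intro t h1 h2
        exact pv_bad_extend arr num (by omega) h1 hbad
      · have hbadf : badB arr num i ((lo + hi) / 2) = false := by simpa using hbad
        have hngt : ¬ (fmax arr i ((lo + hi) / 2) - fmin arr i ((lo + hi) / 2) > num) := by
          unfold badB at hbadf
          simpa using hbadf
        rw [hunfold, if_neg hngt]
        apply ih ((lo + hi) / 2 + 1) hi (by omega) (by omega) hhn (by omega) ?_ hsuf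
        intro t h1 h2
        by_cases hc : t < lo
        · exact hpre t h1 hc
        · by_contra hcc
          have hbt : badB arr num i t = true := by simpa using hcc
          have := pv_bad_extend arr num h1 (t' := (lo + hi) / 2) (by omega) hbt
          rw [hbadf] at this
          exact Bool.false_ne_true this
    · have hle : lo = hi := by omega
      show (if lo < hi then _ else lo) = _
      rw [if_neg hlt]
      by_cases hc : lo < arr.length
      · symm
        apply pv_Fidx_eq_of arr num hpre (hsuf lo (by omega) hc) hil hc
      · have hlon : lo = arr.length := by omega
        rw [hlon]
        symm
        apply pv_Fidx_none arr num
        intro t h1 h2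
        exact hpre t h1 (by omega)

-- ---- B's outer fold ----
lemma pv_B_fold (arr : List Int) (num : Int) :
    ∀ m, m ≤ arr.length →
    (List.range m).foldl
      (fun ans i => ans + ((pvBSearch num (arr :: pvBuildLvls arr.length combMax arr.length 1 arr)
        (arr :: pvBuildLvls arr.length combMin arr.length 1 arr) i (arr.length + 1 - i) i
        arr.length : Int) - (i : Int))) 0 =
      ∑ i ∈ Finset.range m, ((Fidx arr num arr.length i : Int) - (i : Int)) := by
  intro m
  induction m with
  | zero => simp
  | succ m ih =>
    intro hm
    rw [List.range_succ, List.foldl_append, ih (by omega), Finset.sum_range_succ]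
    simp only [List.foldl_cons, List.foldl_nil]
    rw [pv_bs arr num m (arr.length + 1 - m) m arr.length (le_refl m) (by omega) (le_refl _)
      (by omega) (by intro t h1 h2; omega) (by intro t h1 h2; omega)]

lemma pv_B_value (arr : List Int) {num : Int} (hnum : 0 ≤ num) :
    max_min_subarr_alt arr num =
      ∑ i ∈ Finset.range arr.length, ((Fidx arr num arr.length i : Int) - (i : Int)) := by
  unfold max_min_subarr_alt
  rw [if_neg (by omega)]
  exact pv_B_fold arr num arr.length (le_refl _)

lemma pv_main (arr : List Int) {num : Int} (hnum : 0 ≤ num) :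
    max_min_subarr arr num = max_min_subarr_alt arr num := by
  rw [pv_A_value arr hnum, pv_B_value arr hnum]

-- ---- the num < 0 corner: A's stranded pointer vs B's zero ----
lemma pv_B_neg (arr : List Int) {num : Int} (h : num < 0) : max_min_subarr_alt arr num = 0 := by
  unfold max_min_subarr_alt
  rw [if_pos h]

lemma pv_A_neg_fold (arr : List Int) {num : Int} (hnum : num < 0) (hlen : 1 ≤ arr.length) :
    ∀ m, 1 ≤ m → m ≤ arr.length →
    (List.range m).foldl (pvStepA arr num arr.length) (0, 0, [], []) =
      (-(∑ i ∈ Finset.range m, (i : Int)), 0,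
        [(arr.getD 0 0, 0)], [(arr.getD 0 0, 0)]) := by
  have hstep1 : ∀ (i : Nat) (maxd mind : List (Int × Nat)),
      maxd.dropWhile (fun p => decide (p.2 < i)) = [] →
      mind.dropWhile (fun p => decide (p.2 < i)) = [] →
      pvInnerA arr num arr.length i (arr.length - 0) 0 maxd mind =
        (0, [(arr.getD 0 0, 0)], [(arr.getD 0 0, 0)], true, (0 : Int) - (i : Int)) := by
    intro i maxd mind hmx hmn
    obtain ⟨f, hf⟩ : ∃ f, arr.length - 0 = f + 1 := ⟨arr.length - 1, by omega⟩
    rw [hf]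
    have hcond : arr.getD 0 0 - arr.getD 0 0 > num := by omega
    show (if 0 < arr.length then _ else _) = _
    rw [if_pos (by omega)]
    simp only [hmx, hmn]
    show (if ((pvRevDrop _ [] ++ [(arr.getD 0 0, 0)]).headD (0, 0)).1 -
        ((pvRevDrop _ [] ++ [(arr.getD 0 0, 0)]).headD (0, 0)).1 > num then _ else _) = _
    show (if arr.getD 0 0 - arr.getD 0 0 > num then _ else _) = _
    rw [if_pos hcond]
    simp [pvRevDrop]
  intro m
  induction m with
  | zero => intro h; omega
  | succ m ih =>
    intro _ hm
    rcases Nat.eq_zero_or_pos m with h0 | h0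
    · subst h0
      rw [List.range_succ, List.foldl_append]
      simp only [List.range_zero, List.foldl_nil, List.foldl_cons]
      unfold pvStepA
      have hs := hstep1 0 [] [] rfl rfl
      simp only [Nat.sub_zero] at hs
      simp [hs]
    · rw [List.range_succ, List.foldl_append, ih (by omega) (by omega)]
      simp only [List.foldl_cons, List.foldl_nil]
      unfold pvStepA
      have hs := hstep1 m [(arr.getD 0 0, 0)] [(arr.getD 0 0, 0)]
        (by rw [List.dropWhile_cons_of_pos (by simp; omega)]; rfl)
        (by rw [List.dropWhile_cons_of_pos (by simp; omega)]; rfl)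
      simp only [Nat.sub_zero, List.getD_eq_getElem?_getD] at hs
      simp [hs, Finset.sum_range_succ]
      ring

lemma pv_A_neg_val (arr : List Int) {num : Int} (h : num < 0) (hlen : 1 ≤ arr.length) :
    max_min_subarr arr num = -(∑ i ∈ Finset.range arr.length, (i : Int)) := by
  rw [pv_A_eq_fold, pv_A_neg_fold arr h hlen arr.length hlen (le_refl _)]


-- ===== VERDICT (by name: the statement is the Claim_ definition above) =====
theorem max_min_subarr_spec : Claim_unchanged_max_min_subarr := by
  intro arr num _
  unfold Spec_max_min_subarr
  intro hnd
  by_cases hnum : 0 ≤ num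
  · exact pv_main arr hnum
  · have hneg : num < 0 := by omega
    rw [pv_B_neg arr hneg]
    unfold D_max_min_subarr at hnd
    have hlen : arr.length ≤ 1 := by
      by_contra hc
      exact hnd ⟨hneg, by omega⟩
    rcases Nat.eq_zero_or_pos arr.length with h0 | h0
    · have harr : arr = [] := List.length_eq_zero_iff.mp h0
      subst harr
      rfl
    · have h1 : arr.length = 1 := by omega
      rw [pv_A_neg_val arr hneg (by omega), h1]
      simp

theorem max_min_subarr_changed : Claim_changed_max_min_subarr := by
  unfold Claim_changed_max_min_subarr; decide

theorem max_min_subarr_tight : Claim_exact_max_min_subarr := by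
  intro arr num _ hd
  unfold D_max_min_subarr at hd
  obtain ⟨hneg, hlen⟩ := hd
  rw [pv_B_neg arr hneg, pv_A_neg_val arr hneg (by omega)]
  have h1 : (1 : Int) ≤ ∑ i ∈ Finset.range arr.length, (i : Int) := by
    have hm : (1 : Nat) ∈ Finset.range arr.length := Finset.mem_range.mpr (by omega)
    calc (1 : Int) = ((1 : Nat) : Int) := by norm_num
      _ ≤ _ := Finset.single_le_sum (f := fun i : Nat => (i : Int))
          (fun i _ => by positivity) hm
  intro heq
  linarith
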